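-- pv_equiv track=rewrite | github.com/pypi-data/pypi-mirror-124 | packages/cartils/cartils-0.1.1.tar.gz/cartils-0.1.1/cartils/encoding.py | encodes
-- ===== SOURCE A (Python) =====
-- def encodes(data):
--     arr = list(data)
--     rle_mode = False
--
--     index = 0
--     rle_count = 0
--     copy_buffer = ''
--     out = []
--
--     if arr[0] == ' ':
--         rle_mode = True
--     while index < len(arr):
--         if rle_mode:
--             if arr[index] == ' ':
--                 rle_count += 1
--             else:
--                 out.append(str(rle_count))
--                 rle_count = 0
--                 rle_mode = False
--
--                 hex_string = hex(ord(arr[index])).replace('0x', '')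
--                 if len(hex_string) < 2:
--                     hex_string = '0' + hex_string
--                 copy_buffer += hex_string
--         else:
--             if arr[index] != ' ':
--                 hex_string = hex(ord(arr[index])).replace('0x', '')
--                 if len(hex_string) < 2:
--                     hex_string = '0' + hex_string
--                 copy_buffer += hex_string
--             else:
--                 out.append(copy_buffer)
--                 copy_buffer = ''
--                 rle_mode = True
--                 rle_count += 1
--         index += 1
--     if rle_mode:
--         out.append(str(rle_count))
--         out = ['1'] + out
--     else:
--         out.append(copy_buffer)
--         out = ['0'] + out
--     return '.'.join(out)
-- ===== SOURCE B (Python) =====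
-- def encodes(data):
--     chars = list(data)
--     n = len(chars)
--     tokens = []
--     i = 0
--     while i < n:
--         j = i
--         while j < n and (chars[j] == ' ') == (chars[i] == ' '):
--             j += 1
--         run = chars[i:j]
--         if chars[i] == ' ':
--             tokens.append(str(len(run)))
--         else:
--             tokens.append(''.join('%02x' % ord(c) for c in run))
--         i = j
--     prefix = '1' if chars and chars[-1] == ' ' else '0'
--     return '.'.join([prefix] + tokens)
-- ===== Notes on version B (the rewrite author's own statement) =====
-- stated objective: simpler
-- what changed: Replaced A's index-driven state machine (rle_mode flag, rle_count and copy_buffer accumulators mutated per character) by a run-splitting pass that cuts the string into maximal runs of spaces / non-spaces and emits one token (run length, or hex join of the run) per run.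
import Mathlib
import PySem

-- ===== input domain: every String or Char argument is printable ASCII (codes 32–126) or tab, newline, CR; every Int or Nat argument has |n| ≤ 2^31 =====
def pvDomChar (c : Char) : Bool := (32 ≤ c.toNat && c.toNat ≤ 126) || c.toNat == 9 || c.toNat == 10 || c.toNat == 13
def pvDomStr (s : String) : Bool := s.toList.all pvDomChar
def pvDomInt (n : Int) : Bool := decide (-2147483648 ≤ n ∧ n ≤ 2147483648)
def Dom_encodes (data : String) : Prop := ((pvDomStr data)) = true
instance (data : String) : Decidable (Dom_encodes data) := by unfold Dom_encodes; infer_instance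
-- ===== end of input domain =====

-- B replaces A's index-driven rle_mode/copy_buffer state machine by a run-splitting pass
-- (one token per maximal run of spaces / non-spaces); objective: simpler.

-- ===== PORT A =====

-- hexChar/hexDigits: the digits of hex(n) without the '0x' (n > 0); shared numeral helper
def pvHexChar (n : Nat) : Char := if n < 10 then Char.ofNat (48 + n) else Char.ofNat (87 + n)

def pvHexDigits : Nat → List Char
  | 0 => []
  | n+1 => pvHexDigits ((n+1)/16) ++ [pvHexChar ((n+1)%16)]
decreasing_by exact Nat.div_lt_self (Nat.succ_pos n) (by omega)

-- A's hex_string block: hex(ord(c)).replace('0x','') then pad with '0' if len < 2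
def pvHexA (c : Char) : List Char :=
  let h := if c.toNat = 0 then ['0'] else pvHexDigits c.toNat
  if h.length < 2 then '0' :: h else h

-- A's while loop over index, state (rle_mode, rle_count, copy_buffer, out);
-- the trailing if/else (append last token, prepend '1'/'0') is the base case
def encodesLoop : List Char → Bool → Int → List Char → List String → List String
  | [], rle, cnt, buf, out =>
      if rle then "1" :: (out ++ [PySem.Int.toStr cnt]) else "0" :: (out ++ [String.ofList buf])
  | c :: rest, rle, cnt, buf, out =>
      if rle then
        if c == ' ' then encodesLoop rest true (cnt+1) buf out
        else encodesLoop rest false 0 (buf ++ pvHexA c) (out ++ [PySem.Int.toStr cnt])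
      else
        if !(c == ' ') then encodesLoop rest false cnt (buf ++ pvHexA c) out
        else encodesLoop rest true (cnt+1) [] (out ++ [String.ofList buf])

def encodes (data : String) : String :=
  let arr := data.toList
  -- arr[0] raises IndexError on empty input: excluded by Pre_encodes
  let rle : Bool := match arr with | [] => false | c :: _ => c == ' '
  String.intercalate "." (encodesLoop arr rle 0 [] [])

-- ===== PORT B =====

-- '%02x' % ord(c)
def pvHexB (c : Char) : List Char :=
  if c.toNat < 16 then ['0', pvHexChar c.toNat] else pvHexDigits c.toNat

-- B's outer while: split off the maximal run sharing the head's space-ness, emit one token per run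
def pvRuns : List Char → List String
  | [] => []
  | c :: rest =>
      (if c == ' '
        then PySem.Int.toStr (((c :: rest.takeWhile (fun d => (d == ' ') == (c == ' '))).length : Int))
        else String.ofList ((c :: rest.takeWhile (fun d => (d == ' ') == (c == ' '))).flatMap pvHexB)) ::
        pvRuns (rest.dropWhile (fun d => (d == ' ') == (c == ' ')))
termination_by l => l.length
decreasing_by simp only [List.length_cons]; exact Nat.lt_succ_of_le (List.length_dropWhile_le _ _)

def encodes_alt (data : String) : String :=
  let chars := data.toList
  let pfx := if chars.getLast? == some ' ' then "1" else "0"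
  String.intercalate "." (pfx :: pvRuns chars)

-- ===== PRECONDITION & SPEC =====
-- Pre_ excludes only the empty string, on which A raises IndexError (arr[0]).
def Pre_encodes (data : String) : Prop := data ≠ ""
instance (data : String) : Decidable (Pre_encodes data) := by unfold Pre_encodes; infer_instance
def pvWitness_encodes : String := " ab "

def Spec_encodes (data : String) (out : String) : Prop := out = encodes_alt data
instance (data : String) (out : String) : Decidable (Spec_encodes data out) := by unfold Spec_encodes; infer_instance

-- ===== CLAIM (what is proved, stated in full; the proofs are below) =====
def Claim_equal_encodes : Prop := ∀ (data : String), Dom_encodes data → Pre_encodes data → Spec_encodes data (encodes data)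

-- ===== LEMMAS AND PROOFS =====

-- A's loop with the '1'/'0' prefix and the out accumulator factored away: the token list
def pvToks : List Char → Bool → Int → List Char → List String
  | [], rle, cnt, buf => if rle then [PySem.Int.toStr cnt] else [String.ofList buf]
  | c :: rest, rle, cnt, buf =>
      if rle then
        if c == ' ' then pvToks rest true (cnt+1) buf
        else PySem.Int.toStr cnt :: pvToks rest false 0 (buf ++ pvHexA c)
      else
        if !(c == ' ') then pvToks rest false cnt (buf ++ pvHexA c)
        else String.ofList buf :: pvToks rest true (cnt+1) []

-- the mode A's loop ends in
def pvFinalMode : List Char → Bool → Bool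
  | [], m => m
  | c :: rest, _ => pvFinalMode rest (c == ' ')

theorem encodesLoop_eq (l : List Char) : ∀ (rle : Bool) (cnt : Int) (buf : List Char) (out : List String),
    encodesLoop l rle cnt buf out
      = (if pvFinalMode l rle then "1" else "0") :: (out ++ pvToks l rle cnt buf) := by
  induction l with
  | nil => intro rle cnt buf out; cases rle <;> simp [encodesLoop, pvToks, pvFinalMode]
  | cons c rest ih =>
      intro rle cnt buf out
      cases rle <;> cases h : (c == ' ') <;>
        simp [encodesLoop, pvToks, pvFinalMode, h, ih]

theorem pvHexDigits_ne_nil (n : Nat) (h : 0 < n) : pvHexDigits n ≠ [] := by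
  cases n with
  | zero => omega
  | succ m => simp [pvHexDigits]

theorem pvHexDigits_lt16 (n : Nat) (h0 : 0 < n) (h16 : n < 16) : pvHexDigits n = [pvHexChar n] := by
  cases n with
  | zero => omega
  | succ m => rw [pvHexDigits, Nat.div_eq_of_lt h16, Nat.mod_eq_of_lt h16, pvHexDigits, List.nil_append]

theorem pvHex_eq (c : Char) : pvHexA c = pvHexB c := by
  unfold pvHexA pvHexB
  cases hn : c.toNat with
  | zero => simp [pvHexChar]
  | succ m =>
    by_cases h16 : m + 1 < 16
    · rw [if_neg (Nat.succ_ne_zero m), pvHexDigits_lt16 (m+1) (Nat.succ_pos m) h16]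
      simp [h16]
    · have h1 : 0 < (m+1) / 16 := Nat.div_pos (by omega) (by omega)
      obtain ⟨a, as, ha⟩ := List.exists_cons_of_ne_nil (pvHexDigits_ne_nil _ h1)
      rw [if_neg (Nat.succ_ne_zero m), pvHexDigits, ha]
      simp [h16]

theorem flatMap_hex_eq (xs : List Char) : xs.flatMap pvHexB = xs.flatMap pvHexA := by
  induction xs with
  | nil => rfl
  | cons c rest ih => simp [List.flatMap_cons, ih, pvHex_eq]

theorem pred_sp (c : Char) (h : (c == ' ') = true) :
    (fun d : Char => (d == ' ') == (c == ' ')) = (fun d : Char => d == ' ') := by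
  funext d; rw [h]; cases d == ' ' <;> rfl

theorem pred_nsp (c : Char) (h : (c == ' ') = false) :
    (fun d : Char => (d == ' ') == (c == ' ')) = (fun d : Char => !(d == ' ')) := by
  funext d; rw [h]; cases d == ' ' <;> rfl

theorem pvRuns_nil : pvRuns [] = [] := by rw [pvRuns.eq_def]

theorem pvRuns_cons (c : Char) (rest : List Char) :
    pvRuns (c :: rest)
      = (if c == ' '
          then PySem.Int.toStr (((c :: rest.takeWhile (fun d => (d == ' ') == (c == ' '))).length : Int))
          else String.ofList ((c :: rest.takeWhile (fun d => (d == ' ') == (c == ' '))).flatMap pvHexB)) ::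
          pvRuns (rest.dropWhile (fun d => (d == ' ') == (c == ' '))) := by
  rw [pvRuns.eq_def]

theorem toks_runs (n : Nat) : ∀ l : List Char, l.length ≤ n →
    (∀ cnt : Int, pvToks l true cnt []
        = PySem.Int.toStr (cnt + ((l.takeWhile (fun d => d == ' ')).length : Int))
            :: pvRuns (l.dropWhile (fun d => d == ' ')))
    ∧ (∀ buf : List Char, pvToks l false 0 buf
        = String.ofList (buf ++ (l.takeWhile (fun d => !(d == ' '))).flatMap pvHexA)
            :: pvRuns (l.dropWhile (fun d => !(d == ' ')))) := by
  induction n with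
  | zero =>
    intro l hl
    cases l with
    | nil => constructor <;> intro x <;> simp [pvToks, pvRuns_nil]
    | cons c rest => simp at hl
  | succ n ih =>
    intro l hl
    cases l with
    | nil => constructor <;> intro x <;> simp [pvToks, pvRuns_nil]
    | cons c rest =>
      have hr : rest.length ≤ n := by simpa using hl
      constructor
      · intro cnt
        cases h : (c == ' ') with
        | true =>
          rw [show pvToks (c :: rest) true cnt [] = pvToks rest true (cnt+1) [] from by
                simp [pvToks, h],
              (ih rest hr).1 (cnt+1)]
          simp only [List.takeWhile_cons, List.dropWhile_cons, h, if_pos, List.length_cons]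
          congr 2
          push_cast
          ring
        | false =>
          rw [show pvToks (c :: rest) true cnt [] = PySem.Int.toStr cnt :: pvToks rest false 0 (pvHexA c) from by
                simp [pvToks, h],
              (ih rest hr).2 (pvHexA c)]
          simp only [List.takeWhile_cons, List.dropWhile_cons, h, Bool.false_eq_true,
            if_false, List.length_nil, Nat.cast_zero, add_zero]
          rw [pvRuns_cons, pred_nsp c h, if_neg (by simp [h])]
          simp [flatMap_hex_eq, pvHex_eq]
      · intro buf
        cases h : (c == ' ') with
        | true =>
          rw [show pvToks (c :: rest) false 0 buf = String.ofList buf :: pvToks rest true 1 [] from by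
                simp [pvToks, h],
              (ih rest hr).1 1]
          simp only [List.takeWhile_cons, List.dropWhile_cons, h, Bool.not_true,
            Bool.false_eq_true, if_false, List.flatMap_nil, List.append_nil]
          rw [pvRuns_cons, pred_sp c h, if_pos h]
          simp only [List.length_cons]
          congr 3
          push_cast
          ring
        | false =>
          rw [show pvToks (c :: rest) false 0 buf = pvToks rest false 0 (buf ++ pvHexA c) from by
                simp [pvToks, h],
              (ih rest hr).2 (buf ++ pvHexA c)]
          simp only [List.takeWhile_cons, List.dropWhile_cons, h]
          simp [List.append_assoc]

theorem runs_top (c : Char) (rest : List Char) :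
    pvToks (c :: rest) (c == ' ') 0 [] = pvRuns (c :: rest) := by
  cases h : (c == ' ') with
  | true =>
    rw [(toks_runs (c :: rest).length (c :: rest) le_rfl).1 0,
        pvRuns_cons, pred_sp c h, if_pos h]
    simp only [List.takeWhile_cons, List.dropWhile_cons, h, if_pos, List.length_cons]
    congr 2
    push_cast
    ring
  | false =>
    rw [(toks_runs (c :: rest).length (c :: rest) le_rfl).2 [],
        pvRuns_cons, pred_nsp c h, if_neg (by simp [h])]
    simp only [List.takeWhile_cons, List.dropWhile_cons, h]
    simp [flatMap_hex_eq, pvHex_eq]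

theorem finalMode_eq (l : List Char) : ∀ (c : Char) (m : Bool),
    pvFinalMode (c :: l) m = ((c :: l).getLast? == some ' ') := by
  induction l with
  | nil => intro c m; simp [pvFinalMode]
  | cons d l' ih => intro c m; simp only [pvFinalMode, List.getLast?_cons_cons]; exact ih d m

-- ===== VERDICT (by name: the statement is the Claim_ definition above) =====
theorem encodes_spec : Claim_equal_encodes := by
  intro data _ hpre
  obtain ⟨c, rest, harr⟩ : ∃ c rest, data.toList = c :: rest := by
    cases h : data.toList with
    | nil => exact absurd (String.toList_inj.mp (by rw [h]; decide)) hpre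
    | cons c rest => exact ⟨c, rest, rfl⟩
  unfold Spec_encodes encodes encodes_alt
  simp only [harr]
  rw [encodesLoop_eq, finalMode_eq, runs_top]
  simp
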